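-- pv_equiv track=rewrite | github.com/tannuk2505/PABL-2cse24-2410031602 | 2-HomeWork/55-program.py | min_sprinklers
-- ===== SOURCE A (Python) =====
-- def min_sprinklers(gallery, n):
--     intervals = []
--
--     # Step 1: Convert into intervals
--     for i in range(n):
--         if gallery[i] != -1:
--             left = max(0, i - gallery[i])
--             right = min(n - 1, i + gallery[i])
--             intervals.append((left, right))
--
--     # Step 2: Sort intervals by left
--     intervals.sort()
--
--     # Step 3: Greedy coverage
--     count = 0
--     i = 0
--     target = 0
--
--     while target < n:
--         max_reach = -1
--
--         while i < len(intervals) and intervals[i][0] <= target: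
--             max_reach = max(max_reach, intervals[i][1])
--             i += 1
--
--         if max_reach < target:
--             return -1
--
--         count += 1
--         target = max_reach + 1
--
--     return count
-- ===== SOURCE B (Python) =====
-- def min_sprinklers(gallery, n):
--     if n <= 0:
--         return 0
--     # bucket: best right endpoint per (clamped) left endpoint
--     best = [-1] * n
--     for i in range(n):
--         g = gallery[i]
--         if g != -1:
--             l = i - g
--             if l < 0:
--                 l = 0
--             if l < n:
--                 r = i + g
--                 if r > n - 1:
--                     r = n - 1
--                 if r > best[l]:
--                     best[l] = r
--     # prefix maxima: pref[t] = furthest reach of any interval starting at or before t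
--     pref = []
--     m = -1
--     for b in best:
--         if b > m:
--             m = b
--         pref.append(m)
--     # single greedy jump pass
--     count = 0
--     target = 0
--     while target < n:
--         mr = pref[target]
--         if mr < target:
--             return -1
--         count += 1
--         target = mr + 1
--     return count
-- ===== Notes on version B (the rewrite author's own statement) =====
-- stated objective: faster
-- what changed: Replaces building and sorting an interval list plus a two-pointer scan by an O(n) bucket pass (max right endpoint per clamped left endpoint), a prefix-maximum array, and a single greedy jump loop - no sort.
import Mathlib
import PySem

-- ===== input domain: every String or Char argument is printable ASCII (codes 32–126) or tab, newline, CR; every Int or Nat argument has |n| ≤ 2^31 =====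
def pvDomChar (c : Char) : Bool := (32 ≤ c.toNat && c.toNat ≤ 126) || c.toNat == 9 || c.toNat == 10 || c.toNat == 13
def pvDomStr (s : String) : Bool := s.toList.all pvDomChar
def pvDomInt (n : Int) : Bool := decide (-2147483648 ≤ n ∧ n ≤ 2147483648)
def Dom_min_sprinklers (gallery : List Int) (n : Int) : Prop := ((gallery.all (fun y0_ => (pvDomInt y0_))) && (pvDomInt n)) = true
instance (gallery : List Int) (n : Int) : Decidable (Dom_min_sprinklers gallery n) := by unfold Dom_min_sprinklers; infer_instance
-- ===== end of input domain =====

-- B replaces A's sort + two-pointer interval scan by a bucket / prefix-maximum / single greedy-jump pass (objective: faster).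

-- ===== PORT A =====
-- A's inner while loop: consume intervals whose left endpoint is ≤ target, keeping the running max of right endpoints
def aInnerScan : List (Int × Int) → Int → Int → List (Int × Int) × Int
  | [], _, maxr => ([], maxr)
  | (l, r) :: rest, target, maxr =>
    if l ≤ target then aInnerScan rest target (max maxr r)
    else ((l, r) :: rest, maxr)

-- A's outer while loop
def aOuter (ivs : List (Int × Int)) (n count target : Int) : Int :=
  if _h : target < n then
    let p := aInnerScan ivs target (-1)
    if _h2 : p.2 < target then -1
    else aOuter p.1 n (count + 1) (p.2 + 1)
  else count
termination_by (n - target).toNat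
decreasing_by simp only [p] at _h2; omega

def min_sprinklers (gallery : List Int) (n : Int) : Int :=
  let intervals := (PySem.List.pyRange 0 n 1).foldl (fun acc i =>
      let g := (PySem.List.pyGet? gallery i).getD 0   -- in range whenever Pre_ holds
      if g ≠ -1 then acc ++ [(max 0 (i - g), min (n - 1) (i + g))] else acc)
    []
  aOuter (PySem.List.sorted2 intervals (fun p => p.1) (fun p => p.2)) n 0 0

-- ===== PORT B =====
-- B's greedy jump loop over the prefix-maximum list
def bJump (pref : List Int) (n count target : Int) : Int :=
  if _h : target < n then
    let mr := pref.getD target.toNat (-1)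
    if _h2 : mr < target then -1
    else bJump pref n (count + 1) (mr + 1)
  else count
termination_by (n - target).toNat
decreasing_by simp only [mr] at _h2; omega

def min_sprinklers_alt (gallery : List Int) (n : Int) : Int :=
  if n ≤ 0 then 0
  else
    -- bucket: best right endpoint per (clamped) left endpoint
    let best := (PySem.List.pyRange 0 n 1).foldl (fun best i =>
        let g := (PySem.List.pyGet? gallery i).getD 0   -- in range whenever Pre_ holds
        if g ≠ -1 then
          let l := if i - g < 0 then 0 else i - g
          if l < n then
            let r := if i + g > n - 1 then n - 1 else i + g
            if r > best.getD l.toNat (-1) then best.set l.toNat r else best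
          else best
        else best)
      (List.replicate n.toNat (-1))
    -- prefix maxima
    let pm := best.foldl (fun (acc : List Int × Int) b =>
        let m := if b > acc.2 then b else acc.2
        (acc.1 ++ [m], m)) ([], -1)
    bJump pm.1 n 0 0

-- ===== PRECONDITION & SPEC =====
-- Pre_ excludes exactly the inputs where the Python A raises IndexError: n > len(gallery) (B raises there too).
def Pre_min_sprinklers (gallery : List Int) (n : Int) : Prop := n ≤ (gallery.length : Int)
instance (gallery : List Int) (n : Int) : Decidable (Pre_min_sprinklers gallery n) := by unfold Pre_min_sprinklers; infer_instance
def pvWitness_min_sprinklers : List Int × Int := ([2, -1, 2], 3)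

def Spec_min_sprinklers (gallery : List Int) (n : Int) (out : Int) : Prop := out = min_sprinklers_alt gallery n
instance (gallery : List Int) (n : Int) (out : Int) : Decidable (Spec_min_sprinklers gallery n out) := by unfold Spec_min_sprinklers; infer_instance

-- ===== CLAIM (what is proved, stated in full; the proofs are below) =====
def Claim_equal_min_sprinklers : Prop := ∀ (gallery : List Int) (n : Int), Dom_min_sprinklers gallery n → Pre_min_sprinklers gallery n → Spec_min_sprinklers gallery n (min_sprinklers gallery n)

-- ===== LEMMAS AND PROOFS =====

-- F ivs t = max(-1, max right endpoint of intervals with left ≤ t): the only quantity the greedy needs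
def fStep (t m : Int) (p : Int × Int) : Int := if p.1 ≤ t then max m p.2 else m
def F (ivs : List (Int × Int)) (t : Int) : Int := ivs.foldl (fStep t) (-1)

-- the abstract greedy both ports implement
def G (ivs : List (Int × Int)) (n count target : Int) : Int :=
  if _h : target < n then
    if _h2 : F ivs target < target then -1
    else G ivs n (count + 1) (F ivs target + 1)
  else count
termination_by (n - target).toNat
decreasing_by omega

-- one-step equation lemmas
lemma aOuter_step (ivs : List (Int × Int)) (n count target : Int) (h : target < n) :
    aOuter ivs n count target =
      if (aInnerScan ivs target (-1)).2 < target then -1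
      else aOuter (aInnerScan ivs target (-1)).1 n (count + 1) ((aInnerScan ivs target (-1)).2 + 1) := by
  rw [aOuter]; simp [h]

lemma aOuter_stop (ivs : List (Int × Int)) (n count target : Int) (h : ¬ target < n) :
    aOuter ivs n count target = count := by
  rw [aOuter]; simp [h]

lemma G_step (ivs : List (Int × Int)) (n count target : Int) (h : target < n) :
    G ivs n count target =
      if F ivs target < target then -1 else G ivs n (count + 1) (F ivs target + 1) := by
  rw [G]; simp [h]

lemma G_stop (ivs : List (Int × Int)) (n count target : Int) (h : ¬ target < n) :
    G ivs n count target = count := by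
  rw [G]; simp [h]

lemma bJump_step (pref : List Int) (n count target : Int) (h : target < n) :
    bJump pref n count target =
      if pref.getD target.toNat (-1) < target then -1
      else bJump pref n (count + 1) (pref.getD target.toNat (-1) + 1) := by
  rw [bJump]; simp [h]

lemma bJump_stop (pref : List Int) (n count target : Int) (h : ¬ target < n) :
    bJump pref n count target = count := by
  rw [bJump]; simp [h]

lemma foldl_fStep_max (t : Int) : ∀ (l : List (Int × Int)) (a b : Int),
    l.foldl (fStep t) (max a b) = max a (l.foldl (fStep t) b) := by
  intro l
  induction l with
  | nil => intro a b; rfl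
  | cons p l ih =>
    intro a b
    simp only [List.foldl_cons, fStep]
    by_cases h : p.1 ≤ t
    · rw [if_pos h, if_pos h, max_assoc, ih]
    · rw [if_neg h, if_neg h, ih]

lemma le_foldl_fStep (t : Int) : ∀ (l : List (Int × Int)) (s : Int), s ≤ l.foldl (fStep t) s := by
  intro l
  induction l with
  | nil => intro s; exact le_refl s
  | cons p l ih =>
    intro s
    simp only [List.foldl_cons, fStep]
    by_cases h : p.1 ≤ t
    · rw [if_pos h]; exact le_trans (le_max_left _ _) (ih _)
    · rw [if_neg h]; exact ih _

lemma foldl_fStep_lt (t : Int) : ∀ (l : List (Int × Int)) (s : Int),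
    (∀ p ∈ l, p.2 < t) → s < t → l.foldl (fStep t) s < t := by
  intro l
  induction l with
  | nil => intro s _ hs; exact hs
  | cons p l ih =>
    intro s hall hs
    simp only [List.foldl_cons, fStep]
    by_cases h : p.1 ≤ t
    · rw [if_pos h]
      exact ih _ (fun q hq => hall q (List.mem_cons_of_mem _ hq))
        (max_lt hs (hall p (List.mem_cons_self)))
    · rw [if_neg h]
      exact ih _ (fun q hq => hall q (List.mem_cons_of_mem _ hq)) hs

lemma neg_one_le_F (l : List (Int × Int)) (t : Int) : -1 ≤ F l t := le_foldl_fStep t l (-1)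

lemma F_append_singleton (l : List (Int × Int)) (p : Int × Int) (t : Int) :
    F (l ++ [p]) t = fStep t (F l t) p := by
  unfold F; rw [List.foldl_append]; rfl

lemma F_append (a b : List (Int × Int)) (t : Int) : F (a ++ b) t = max (F a t) (F b t) := by
  unfold F
  rw [List.foldl_append]
  have h1 : a.foldl (fStep t) (-1) = max (a.foldl (fStep t) (-1)) (-1) :=
    (max_eq_left (le_foldl_fStep t a (-1))).symm
  conv_lhs => rw [h1, foldl_fStep_max]

lemma foldl_fStep_no_hit (t : Int) : ∀ (l : List (Int × Int)) (s : Int),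
    (∀ p ∈ l, ¬ p.1 ≤ t) → l.foldl (fStep t) s = s := by
  intro l
  induction l with
  | nil => intro s _; rfl
  | cons p l ih =>
    intro s hall
    simp only [List.foldl_cons, fStep]
    rw [if_neg (hall p (List.mem_cons_self))]
    exact ih _ (fun q hq => hall q (List.mem_cons_of_mem _ hq))

lemma foldl_fStep_all_hit (t : Int) : ∀ (l : List (Int × Int)) (s : Int),
    (∀ p ∈ l, p.1 ≤ t) → l.foldl (fStep t) s = l.foldl (fun acc p => max acc p.2) s := by
  intro l
  induction l with
  | nil => intro s _; rfl
  | cons p l ih =>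
    intro s hall
    simp only [List.foldl_cons, fStep]
    rw [if_pos (hall p (List.mem_cons_self))]
    exact ih _ (fun q hq => hall q (List.mem_cons_of_mem _ hq))

lemma snd_le_foldl_fStep (t : Int) : ∀ (l : List (Int × Int)) (s : Int) (p : Int × Int),
    p ∈ l → p.1 ≤ t → p.2 ≤ l.foldl (fStep t) s := by
  intro l
  induction l with
  | nil => intro s p hp; exact absurd hp (List.not_mem_nil)
  | cons q l ih =>
    intro s p hp hpt
    simp only [List.foldl_cons]
    rcases List.mem_cons.mp hp with rfl | hp'
    · have : p.2 ≤ fStep t s p := by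
        simp only [fStep, if_pos hpt]; exact le_max_right _ _
      exact le_trans this (le_foldl_fStep t l _)
    · exact ih _ p hp' hpt

lemma innerScan_eq (t : Int) : ∀ (l : List (Int × Int)) (m : Int),
    aInnerScan l t m = (l.dropWhile (fun p => decide (p.1 ≤ t)),
                        (l.takeWhile (fun p => decide (p.1 ≤ t))).foldl (fun acc p => max acc p.2) m) := by
  intro l
  induction l with
  | nil => intro m; rfl
  | cons p l ih =>
    intro m
    obtain ⟨pl, pr⟩ := p
    by_cases h : pl ≤ t
    · simp [aInnerScan, h, ih]
    · simp [aInnerScan, h]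

lemma dropWhile_all_not (t : Int) : ∀ (l : List (Int × Int)),
    l.Pairwise (fun a b => a.1 ≤ b.1) →
    ∀ p ∈ l.dropWhile (fun p => decide (p.1 ≤ t)), ¬ p.1 ≤ t := by
  intro l
  induction l with
  | nil => intro _ p hp; simp at hp
  | cons q l ih =>
    intro hpw p hp
    rw [List.dropWhile_cons] at hp
    by_cases h : q.1 ≤ t
    · simp only [decide_eq_true h, if_pos] at hp
      exact ih (List.Pairwise.of_cons hpw) p hp
    · simp only [decide_eq_false h, Bool.false_eq_true, if_neg, not_false_iff] at hp
      rcases List.mem_cons.mp hp with rfl | hp'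
      · exact h
      · have hle := (List.pairwise_cons.mp hpw).1 p hp'
        omega

lemma mem_takeWhile_le (t : Int) (l : List (Int × Int)) (p : Int × Int)
    (hp : p ∈ l.takeWhile (fun q => decide (q.1 ≤ t))) : p.1 ≤ t :=
  of_decide_eq_true (List.mem_takeWhile_imp (p := fun (q : Int × Int) => decide (q.1 ≤ t)) hp)

lemma innerScan_snd_eq_F (t : Int) (l : List (Int × Int)) (h : l.Pairwise (fun a b => a.1 ≤ b.1)) :
    (aInnerScan l t (-1)).2 = F l t := by
  rw [innerScan_eq]
  have hsplit : l.takeWhile (fun p => decide (p.1 ≤ t)) ++ l.dropWhile (fun p => decide (p.1 ≤ t)) = l :=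
    List.takeWhile_append_dropWhile
  conv_rhs => rw [← hsplit]
  rw [F_append]
  have hdw : F (l.dropWhile (fun p => decide (p.1 ≤ t))) t = -1 :=
    foldl_fStep_no_hit t _ (-1) (dropWhile_all_not t l h)
  rw [hdw, max_eq_left (neg_one_le_F _ _)]
  exact (foldl_fStep_all_hit t _ (-1) (fun p hp => mem_takeWhile_le t l p hp)).symm

lemma aOuter_eq_G : ∀ (fuel : Nat) (pre ivs : List (Int × Int)) (n count target : Int),
    (n - target).toNat ≤ fuel → ivs.Pairwise (fun a b => a.1 ≤ b.1) → 0 ≤ target →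
    (∀ p ∈ pre, p.1 ≤ target ∧ p.2 < target) →
    aOuter ivs n count target = G (pre ++ ivs) n count target := by
  intro fuel
  induction fuel with
  | zero =>
    intro pre ivs n count target hf _ ht _
    have hnt : ¬ target < n := by omega
    rw [aOuter_stop _ _ _ _ hnt, G_stop _ _ _ _ hnt]
  | succ fuel ih =>
    intro pre ivs n count target hf hpw ht hpre
    by_cases hlt : target < n
    · have hscan := innerScan_snd_eq_F target ivs hpw
      have key : F (pre ++ ivs) target = max (F pre target) (F ivs target) := F_append _ _ _
      have hpre_lt : F pre target < target :=
        foldl_fStep_lt target pre (-1) (fun p hp => (hpre p hp).2) (by omega)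
      rw [aOuter_step _ _ _ _ hlt, G_step _ _ _ _ hlt, hscan]
      by_cases hcase : F ivs target < target
      · rw [if_pos hcase, if_pos (by rw [key]; exact max_lt hpre_lt hcase)]
      · have htm : target ≤ F ivs target := by omega
        have hFeq : F (pre ++ ivs) target = F ivs target := by
          rw [key]; exact max_eq_right (le_trans (le_of_lt hpre_lt) htm)
        rw [if_neg hcase, if_neg (by rw [hFeq]; exact hcase), hFeq]
        have h1 : (aInnerScan ivs target (-1)).1 = ivs.dropWhile (fun p => decide (p.1 ≤ target)) := by
          rw [innerScan_eq]
        rw [h1]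
        have hsplit : (pre ++ ivs.takeWhile (fun p => decide (p.1 ≤ target))) ++
            ivs.dropWhile (fun p => decide (p.1 ≤ target)) = pre ++ ivs := by
          rw [List.append_assoc, List.takeWhile_append_dropWhile]
        conv_rhs => rw [← hsplit]
        refine ih _ _ n (count + 1) (F ivs target + 1) (by omega)
          (List.Pairwise.sublist (List.dropWhile_sublist _) hpw) (by omega) ?_
        intro p hp
        rcases List.mem_append.mp hp with hp' | hp'
        · obtain ⟨ha, hb⟩ := hpre p hp'
          exact ⟨by omega, by omega⟩
        · have ht' := mem_takeWhile_le target ivs p hp'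
          have hpiv : p ∈ ivs := (List.takeWhile_sublist _).mem hp'
          have hle : p.2 ≤ F ivs target := snd_le_foldl_fStep target ivs (-1) p hpiv ht'
          exact ⟨by omega, by omega⟩
    · rw [aOuter_stop _ _ _ _ hlt, G_stop _ _ _ _ hlt]

lemma G_congr : ∀ (fuel : Nat) (l1 l2 : List (Int × Int)) (n count target : Int),
    (n - target).toNat ≤ fuel → 0 ≤ target →
    (∀ t, 0 ≤ t → t < n → F l1 t = F l2 t) →
    G l1 n count target = G l2 n count target := by
  intro fuel
  induction fuel with
  | zero =>
    intro l1 l2 n count target hf ht _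
    have hnt : ¬ target < n := by omega
    rw [G_stop _ _ _ _ hnt, G_stop _ _ _ _ hnt]
  | succ fuel ih =>
    intro l1 l2 n count target hf ht h
    by_cases hlt : target < n
    · rw [G_step _ _ _ _ hlt, G_step _ _ _ _ hlt, h target ht hlt]
      by_cases hcase : F l2 target < target
      · rw [if_pos hcase, if_pos hcase]
      · rw [if_neg hcase, if_neg hcase]
        exact ih _ _ _ _ _ (by omega) (by omega) h
    · rw [G_stop _ _ _ _ hlt, G_stop _ _ _ _ hlt]

lemma foldl_fStep_perm (t : Int) {l1 l2 : List (Int × Int)} (h : l1.Perm l2) :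
    ∀ s, l1.foldl (fStep t) s = l2.foldl (fStep t) s := by
  induction h with
  | nil => intro s; rfl
  | cons x _ ih => intro s; simp only [List.foldl_cons]; exact ih _
  | swap x y l =>
    intro s
    simp only [List.foldl_cons]
    have : fStep t (fStep t s y) x = fStep t (fStep t s x) y := by
      simp only [fStep]; split_ifs <;> simp [max_right_comm]
    rw [this]
  | trans _ _ ih1 ih2 => intro s; rw [ih1, ih2]

lemma F_perm (l1 l2 : List (Int × Int)) (h : l1.Perm l2) (t : Int) : F l1 t = F l2 t :=
  foldl_fStep_perm t h (-1)

lemma pairwise_insertBy {α : Type} (before : α → α → Bool) (P : α → α → Prop)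
    (htrans : ∀ a b c, P a b → P b c → P a c)
    (h1 : ∀ a b, before a b = true → P a b) (h2 : ∀ a b, before a b = false → P b a)
    (x : α) : ∀ (ys : List α), ys.Pairwise P → (PySem.List.insertBy before x ys).Pairwise P := by
  intro ys
  induction ys with
  | nil => intro _; simp [PySem.List.insertBy]
  | cons y ys ih =>
    intro hpw
    show (if before x y then x :: y :: ys else y :: PySem.List.insertBy before x ys).Pairwise P
    by_cases h : before x y
    · rw [if_pos h]
      refine List.pairwise_cons.mpr ⟨?_, hpw⟩
      intro z hz
      rcases List.mem_cons.mp hz with rfl | hz'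
      · exact h1 _ _ h
      · exact htrans _ _ _ (h1 _ _ h) ((List.pairwise_cons.mp hpw).1 z hz')
    · rw [if_neg h]
      refine List.pairwise_cons.mpr ⟨?_, ih (List.Pairwise.of_cons hpw)⟩
      intro z hz
      rcases (PySem.List.mem_insertBy _ _ _ _).mp hz with rfl | hz'
      · exact h2 _ _ (by simpa using h)
      · exact (List.pairwise_cons.mp hpw).1 z hz'

lemma sorted2_pairwise_fst (ivs : List (Int × Int)) :
    (PySem.List.sorted2 ivs (fun p => p.1) (fun p => p.2)).Pairwise (fun a b => a.1 ≤ b.1) := by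
  have hrfl : PySem.List.sorted2 ivs (fun p => p.1) (fun p => p.2) =
      ivs.foldl (fun acc x => PySem.List.insertBy
        (fun a b => decide (a.1 < b.1) || (!decide (b.1 < a.1) && decide (a.2 < b.2))) x acc) [] := rfl
  rw [hrfl]
  have main : ∀ (xs : List (Int × Int)) (acc : List (Int × Int)),
      acc.Pairwise (fun a b => a.1 ≤ b.1) →
      (xs.foldl (fun acc x => PySem.List.insertBy
        (fun a b => decide (a.1 < b.1) || (!decide (b.1 < a.1) && decide (a.2 < b.2))) x acc) acc).Pairwise
        (fun a b => a.1 ≤ b.1) := by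
    intro xs
    induction xs with
    | nil => intro acc h; exact h
    | cons x xs ih =>
      intro acc h
      simp only [List.foldl_cons]
      refine ih _ ?_
      refine pairwise_insertBy
        (fun a b => decide (a.1 < b.1) || (!decide (b.1 < a.1) && decide (a.2 < b.2)))
        (fun (a b : Int × Int) => a.1 ≤ b.1) (fun a b c hab hbc => le_trans hab hbc) ?_ ?_ x acc h
      · intro a b hab
        simp only [Bool.or_eq_true, Bool.and_eq_true, decide_eq_true_eq, Bool.not_eq_true',
          decide_eq_false_iff_not] at hab
        rcases hab with h' | ⟨h', _⟩ <;> omega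
      · intro a b hab
        by_contra hc
        have : decide (a.1 < b.1) = true := decide_eq_true (by omega)
        simp [this] at hab
  exact main ivs [] List.Pairwise.nil

lemma foldl_max_assoc : ∀ (l : List Int) (a b : Int), l.foldl max (max a b) = max (l.foldl max a) b := by
  intro l
  induction l with
  | nil => intro a b; rfl
  | cons c l ih =>
    intro a b
    simp only [List.foldl_cons]
    rw [max_right_comm a b c, ih]

lemma prefmax_set : ∀ (xs : List Int) (j : Nat) (v a : Int) (_hj : j < xs.length) (k : Nat),
    ((xs.set j (max (xs.getD j (-1)) v)).take (k + 1)).foldl max a =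
      if j ≤ k then max ((xs.take (k + 1)).foldl max a) v else (xs.take (k + 1)).foldl max a := by
  intro xs
  induction xs with
  | nil => intro j v a hj; simp at hj
  | cons x xs ih =>
    intro j v a hj k
    cases j with
    | zero =>
      rw [if_pos (Nat.zero_le k)]
      simp only [List.set_cons_zero, List.getD_cons_zero, List.take_succ_cons, List.foldl_cons]
      rw [← max_assoc]
      exact foldl_max_assoc _ _ _
    | succ j =>
      cases k with
      | zero =>
        rw [if_neg (by omega)]
        simp [List.set_cons_succ, List.take_succ_cons]
      | succ k =>
        simp only [List.set_cons_succ, List.take_succ_cons, List.foldl_cons, List.getD_cons_succ]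
        rw [ih j v (max a x) (by simpa using hj) k]
        by_cases h : j ≤ k
        · rw [if_pos h, if_pos (by omega)]
        · rw [if_neg h, if_neg (by omega)]

lemma foldl_max_replicate (j : Nat) : (List.replicate j (-1 : Int)).foldl max (-1) = -1 := by
  induction j with
  | zero => rfl
  | succ j ih => simp only [List.replicate_succ, List.foldl_cons, max_self]; exact ih

lemma bJump_eq_G : ∀ (fuel : Nat) (pref : List Int) (ivs : List (Int × Int)) (n count target : Int),
    (n - target).toNat ≤ fuel → 0 ≤ target →
    (∀ t : Int, 0 ≤ t → t < n → pref.getD t.toNat (-1) = F ivs t) →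
    bJump pref n count target = G ivs n count target := by
  intro fuel
  induction fuel with
  | zero =>
    intro pref ivs n count target hf ht _
    have hnt : ¬ target < n := by omega
    rw [bJump_stop _ _ _ _ hnt, G_stop _ _ _ _ hnt]
  | succ fuel ih =>
    intro pref ivs n count target hf ht h
    by_cases hlt : target < n
    · rw [bJump_step _ _ _ _ hlt, G_step _ _ _ _ hlt, h target ht hlt]
      by_cases hcase : F ivs target < target
      · rw [if_pos hcase, if_pos hcase]
      · rw [if_neg hcase, if_neg hcase]
        exact ih _ _ _ _ _ (by omega) (by omega) h
    · rw [bJump_stop _ _ _ _ hlt, G_stop _ _ _ _ hlt]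

-- named copies of the three fold bodies of the ports (definitionally equal to the port lambdas)
def aBody (gallery : List Int) (n : Int) (acc : List (Int × Int)) (i : Int) : List (Int × Int) :=
  let g := (PySem.List.pyGet? gallery i).getD 0
  if g ≠ -1 then acc ++ [(max 0 (i - g), min (n - 1) (i + g))] else acc

def bBody (gallery : List Int) (n : Int) (best : List Int) (i : Int) : List Int :=
  let g := (PySem.List.pyGet? gallery i).getD 0
  if g ≠ -1 then
    let l := if i - g < 0 then 0 else i - g
    if l < n then
      let r := if i + g > n - 1 then n - 1 else i + g
      if r > best.getD l.toNat (-1) then best.set l.toNat r else best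
    else best
  else best

def pBody (acc : List Int × Int) (b : Int) : List Int × Int :=
  let m := if b > acc.2 then b else acc.2
  (acc.1 ++ [m], m)

lemma aBody_skip (gallery : List Int) (n : Int) (acc : List (Int × Int)) (i : Int)
    (h : (PySem.List.pyGet? gallery i).getD 0 = -1) : aBody gallery n acc i = acc := by
  simp [aBody, h]

lemma bBody_skip (gallery : List Int) (n : Int) (best : List Int) (i : Int)
    (h : (PySem.List.pyGet? gallery i).getD 0 = -1) : bBody gallery n best i = best := by
  simp [bBody, h]

lemma clamp_left (i g : Int) : (if i - g < 0 then 0 else i - g) = max 0 (i - g) := by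
  split_ifs with h
  · exact (max_eq_left (by omega)).symm
  · exact (max_eq_right (by omega)).symm

lemma clamp_right (i g n : Int) : (if i + g > n - 1 then n - 1 else i + g) = min (n - 1) (i + g) := by
  split_ifs with h
  · exact (min_eq_left (by omega)).symm
  · exact (min_eq_right (by omega)).symm

lemma aBody_add (gallery : List Int) (n : Int) (acc : List (Int × Int)) (i g : Int)
    (hgd : (PySem.List.pyGet? gallery i).getD 0 = g) (hg : g ≠ -1) :
    aBody gallery n acc i = acc ++ [(max 0 (i - g), min (n - 1) (i + g))] := by
  simp only [aBody, hgd]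
  rw [if_pos hg]

lemma bBody_out (gallery : List Int) (n : Int) (best : List Int) (i g : Int)
    (hgd : (PySem.List.pyGet? gallery i).getD 0 = g) (hg : g ≠ -1)
    (hln : ¬ max 0 (i - g) < n) : bBody gallery n best i = best := by
  simp only [bBody, hgd, clamp_left, clamp_right]
  rw [if_pos hg, if_neg hln]

lemma bBody_in (gallery : List Int) (n : Int) (best : List Int) (i g : Int)
    (hgd : (PySem.List.pyGet? gallery i).getD 0 = g) (hg : g ≠ -1)
    (hln : max 0 (i - g) < n) (hjlen : (max 0 (i - g)).toNat < best.length) :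
    bBody gallery n best i =
      best.set (max 0 (i - g)).toNat
        (max (best.getD (max 0 (i - g)).toNat (-1)) (min (n - 1) (i + g))) := by
  simp only [bBody, hgd, clamp_left, clamp_right]
  rw [if_pos hg, if_pos hln]
  split_ifs with h
  · rw [show max (best.getD (max 0 (i - g)).toNat (-1)) (min (n - 1) (i + g)) =
        min (n - 1) (i + g) from max_eq_right (le_of_lt h)]
  · rw [show max (best.getD (max 0 (i - g)).toNat (-1)) (min (n - 1) (i + g)) =
        best.getD (max 0 (i - g)).toNat (-1) from max_eq_left (by omega)]
    rw [List.getD_eq_getElem _ _ hjlen, List.set_getElem_self]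

lemma bucket_invariant (gallery : List Int) (n : Int) (hn : 0 < n) : ∀ (L : List Int),
    (L.foldl (bBody gallery n) (List.replicate n.toNat (-1))).length = n.toNat ∧
    ∀ t : Int, 0 ≤ t → t < n →
      ((L.foldl (bBody gallery n) (List.replicate n.toNat (-1))).take (t.toNat + 1)).foldl max (-1)
        = F (L.foldl (aBody gallery n) []) t := by
  intro L
  induction L using List.reverseRecOn with
  | nil =>
    refine ⟨by simp, ?_⟩
    intro t ht htn
    simp only [List.foldl_nil]
    rw [List.take_replicate]
    exact foldl_max_replicate _
  | append_singleton L i ih =>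
    obtain ⟨ihlen, ihinv⟩ := ih
    simp only [List.foldl_append, List.foldl_cons, List.foldl_nil]
    by_cases hg : (PySem.List.pyGet? gallery i).getD 0 = -1
    · rw [bBody_skip _ _ _ _ hg, aBody_skip _ _ _ _ hg]
      exact ⟨ihlen, ihinv⟩
    · set g := (PySem.List.pyGet? gallery i).getD 0 with hgd
      have h0l : (0 : Int) ≤ max 0 (i - g) := le_max_left _ _
      by_cases hln : max 0 (i - g) < n
      · have hjlen : (max 0 (i - g)).toNat <
            (L.foldl (bBody gallery n) (List.replicate n.toNat (-1))).length := by
          rw [ihlen]; omega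
        rw [bBody_in gallery n _ i g hgd.symm hg hln hjlen, aBody_add gallery n _ i g hgd.symm hg]
        constructor
        · rw [List.length_set]; exact ihlen
        · intro t ht htn
          rw [F_append_singleton, prefmax_set _ _ _ _ hjlen, ihinv t ht htn]
          simp only [fStep]
          by_cases hlt : max 0 (i - g) ≤ t
          · rw [if_pos (by omega : (max 0 (i - g)).toNat ≤ t.toNat), if_pos hlt]
          · rw [if_neg (by omega : ¬ (max 0 (i - g)).toNat ≤ t.toNat), if_neg hlt]
      · rw [bBody_out gallery n _ i g hgd.symm hg hln, aBody_add gallery n _ i g hgd.symm hg]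
        refine ⟨ihlen, ?_⟩
        intro t ht htn
        rw [F_append_singleton, ihinv t ht htn]
        simp only [fStep]
        rw [if_neg (by omega : ¬ max 0 (i - g) ≤ t)]

lemma pref_fold : ∀ (best acc : List Int) (m : Int),
    (best.foldl pBody (acc, m)).1 = acc ++ (List.range best.length).map (fun k => (best.take (k + 1)).foldl max m) := by
  intro best
  induction best with
  | nil => intro acc m; simp
  | cons b bs ih =>
    intro acc m
    have hm : (if b > m then b else m) = max m b := by
      split_ifs with h
      · exact (max_eq_right (le_of_lt h)).symm
      · exact (max_eq_left (by omega)).symm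
    simp only [List.foldl_cons, pBody, hm]
    rw [ih]
    rw [List.length_cons, List.range_succ_eq_map, List.map_cons, List.map_map]
    rw [List.append_assoc]
    congr 1

lemma pref_getD (best : List Int) (k : Nat) (hk : k < best.length) :
    ((best.foldl pBody ([], -1)).1).getD k (-1) = (best.take (k + 1)).foldl max (-1) := by
  rw [pref_fold, List.nil_append, List.getD_eq_getElem?_getD, List.getElem?_map,
    List.getElem?_range hk]
  rfl

-- ===== VERDICT (by name: the statement is the Claim_ definition above) =====
theorem min_sprinklers_spec : Claim_equal_min_sprinklers := by
  unfold Claim_equal_min_sprinklers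
  intro gallery n _hdom _hpre
  unfold Spec_min_sprinklers
  by_cases hn : n ≤ 0
  · have hA : min_sprinklers gallery n =
        aOuter (PySem.List.sorted2 ((PySem.List.pyRange 0 n 1).foldl (aBody gallery n) [])
          (fun p => p.1) (fun p => p.2)) n 0 0 := rfl
    have hr : PySem.List.pyRange 0 n 1 = [] := by
      rw [PySem.List.pyRange_one_eq_nil]; omega
    rw [hA, hr]
    simp only [List.foldl_nil]
    rw [aOuter_stop _ _ _ _ (by omega)]
    unfold min_sprinklers_alt
    rw [if_pos hn]
  · have hA : min_sprinklers gallery n =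
        aOuter (PySem.List.sorted2 ((PySem.List.pyRange 0 n 1).foldl (aBody gallery n) [])
          (fun p => p.1) (fun p => p.2)) n 0 0 := rfl
    have hB : min_sprinklers_alt gallery n =
        bJump (((PySem.List.pyRange 0 n 1).foldl (bBody gallery n)
          (List.replicate n.toNat (-1))).foldl pBody ([], -1)).1 n 0 0 := by
      unfold min_sprinklers_alt
      rw [if_neg (by omega : ¬ n ≤ 0)]
      rfl
    obtain ⟨hlen, hinv⟩ := bucket_invariant gallery n (by omega) (PySem.List.pyRange 0 n 1)
    set ivs := (PySem.List.pyRange 0 n 1).foldl (aBody gallery n) ([] : List (Int × Int)) with hivs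
    set best := (PySem.List.pyRange 0 n 1).foldl (bBody gallery n)
      (List.replicate n.toNat (-1)) with hbest
    have hpref : ∀ t : Int, 0 ≤ t → t < n →
        ((best.foldl pBody ([], -1)).1).getD t.toNat (-1) = F ivs t := by
      intro t ht htn
      rw [pref_getD _ t.toNat (by rw [hlen]; omega), hinv t ht htn]
    have hsorted := sorted2_pairwise_fst ivs
    have hperm := PySem.List.sorted2_perm ivs
      (fun p : Int × Int => p.1) (fun p : Int × Int => p.2) false
    rw [hA, hB]
    rw [aOuter_eq_G ((n - 0).toNat) [] (PySem.List.sorted2 ivs (fun p => p.1) (fun p => p.2))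
      n 0 0 (le_refl _) hsorted (le_refl 0) (by simp)]
    rw [List.nil_append]
    rw [G_congr ((n - 0).toNat) _ ivs n 0 0 (le_refl _) (le_refl 0)
      (fun t _ _ => F_perm _ _ hperm t)]
    exact (bJump_eq_G ((n - 0).toNat) ((best.foldl pBody ([], -1)).1) ivs n 0 0 (le_refl _) (le_refl 0) hpref).symm
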